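-- pv_equiv track=rewrite | github.com/OpenBlatam/IA-Models-Clone | bulk_truthgpt/ultra_optimal_bulk_ai_system.py | _determine_optimization_level
-- ===== SOURCE A (Python) =====
-- from typing import Dict, Any, List, Optional, AsyncGenerator, Tuple, Union
--
-- def _determine_optimization_level(optimization_metrics: Dict[str, Any]) -> str:
--     """Determine the optimization level based on applied optimizations."""
--     if not optimization_metrics:
--         return 'none'
--
--     optimization_count = sum(1 for v in optimization_metrics.values() if v)
--
--     if optimization_count >= 5:
--         return 'transcendent'
--     elif optimization_count >= 4:
--         return 'supreme'
--     elif optimization_count >= 3: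
--         return 'mega_enhanced'
--     elif optimization_count >= 2:
--         return 'ultra'
--     elif optimization_count >= 1:
--         return 'enhanced'
--     else:
--         return 'basic'
-- ===== SOURCE B (Python) =====
-- _NEXT = {
--     'basic': 'enhanced',
--     'enhanced': 'ultra',
--     'ultra': 'mega_enhanced',
--     'mega_enhanced': 'supreme',
--     'supreme': 'transcendent',
--     'transcendent': 'transcendent',  # saturate at the top level
-- }
--
-- def _determine_optimization_level(optimization_metrics):
--     """Determine the optimization level based on applied optimizations."""
--     if not optimization_metrics:
--         return 'none'
--     level = 'basic'
--     for v in optimization_metrics.values():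
--         if v:
--             level = _NEXT[level]
--     return level
-- ===== Notes on version B (the rewrite author's own statement) =====
-- stated objective: alternative
-- what changed: B never computes a count or compares thresholds: it runs a saturating promotion automaton over the values, keeping the current level label as its fold state and stepping it through a successor map once per truthy value; the empty-dict guard is kept.
import Mathlib
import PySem

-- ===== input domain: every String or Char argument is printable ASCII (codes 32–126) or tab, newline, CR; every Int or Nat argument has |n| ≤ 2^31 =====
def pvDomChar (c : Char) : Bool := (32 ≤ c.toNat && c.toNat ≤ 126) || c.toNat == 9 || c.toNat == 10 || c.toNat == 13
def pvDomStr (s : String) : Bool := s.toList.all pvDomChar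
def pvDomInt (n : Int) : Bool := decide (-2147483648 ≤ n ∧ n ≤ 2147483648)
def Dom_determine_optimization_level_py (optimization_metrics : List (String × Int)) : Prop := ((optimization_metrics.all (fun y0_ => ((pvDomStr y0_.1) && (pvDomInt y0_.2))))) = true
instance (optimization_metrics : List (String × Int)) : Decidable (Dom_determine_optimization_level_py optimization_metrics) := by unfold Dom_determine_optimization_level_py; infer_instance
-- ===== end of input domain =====

-- B replaces A's count-then-threshold-cascade by a saturating promotion automaton over the
-- values, stepping a level label through a successor map (objective: alternative).

-- ===== PORT A =====
def determine_optimization_level_py (optimization_metrics : List (String × Int)) : String :=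
  -- marshal the Python dict argument (duplicate keys overwrite, as in a Python dict)
  let d : PySem.Dict String Int := PySem.Dict.ofList optimization_metrics
  if d.items = [] then "none"
  else
    -- sum(1 for v in optimization_metrics.values() if v); int truthiness: v ≠ 0
    let optimization_count : Int :=
      d.values.foldl (fun acc v => if v ≠ 0 then acc + 1 else acc) 0
    if optimization_count ≥ 5 then "transcendent"
    else if optimization_count ≥ 4 then "supreme"
    else if optimization_count ≥ 3 then "mega_enhanced"
    else if optimization_count ≥ 2 then "ultra"
    else if optimization_count ≥ 1 then "enhanced"
    else "basic"

-- ===== PORT B =====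
-- module-level successor map _NEXT of Source B
def pvNextDict : PySem.Dict String String :=
  PySem.Dict.ofList
    [("basic", "enhanced"), ("enhanced", "ultra"), ("ultra", "mega_enhanced"),
     ("mega_enhanced", "supreme"), ("supreme", "transcendent"), ("transcendent", "transcendent")]

def determine_optimization_level_py_alt (optimization_metrics : List (String × Int)) : String :=
  -- marshal the Python dict argument (duplicate keys overwrite, as in a Python dict)
  let d : PySem.Dict String Int := PySem.Dict.ofList optimization_metrics
  if d.items = [] then "none"
  else
    -- promotion automaton: one step per truthy value; _NEXT[level] always hits (the
    -- default "" of getD is dead, KeyError never occurs since every state is a key)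
    d.values.foldl (fun level v => if v ≠ 0 then (pvNextDict.get? level).getD "" else level) "basic"

-- ===== PRECONDITION & SPEC =====
def Spec_determine_optimization_level_py (optimization_metrics : List (String × Int)) (out : String) : Prop := out = determine_optimization_level_py_alt optimization_metrics
instance (optimization_metrics : List (String × Int)) (out : String) : Decidable (Spec_determine_optimization_level_py optimization_metrics out) := by unfold Spec_determine_optimization_level_py; infer_instance

-- ===== CLAIM (what is proved, stated in full; the proofs are below) =====
def Claim_equal_determine_optimization_level_py : Prop := ∀ (optimization_metrics : List (String × Int)), Dom_determine_optimization_level_py optimization_metrics → Spec_determine_optimization_level_py optimization_metrics (determine_optimization_level_py optimization_metrics)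

-- ===== LEMMAS AND PROOFS =====

-- label of a (saturated) count
def pvLab (n : Nat) : String :=
  match n with
  | 0 => "basic" | 1 => "enhanced" | 2 => "ultra"
  | 3 => "mega_enhanced" | 4 => "supreme" | _ => "transcendent"

-- the successor map advances the label of a saturated count by one
theorem pv_next_lab (k : Nat) :
    ((pvNextDict.get? (pvLab (min k 5))).getD "") = pvLab (min (k + 1) 5) := by
  rcases Nat.lt_or_ge k 5 with h | h
  · interval_cases k <;> decide
  · have h1 : min k 5 = 5 := by omega
    have h2 : min (k + 1) 5 = 5 := by omega
    rw [h1, h2]; decide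

-- invariant of B's fold: starting at the label of saturated count k, after the list the
-- state is the label of the saturated total count
theorem pv_fold_lab (vs : List Int) (k : Nat) :
    vs.foldl (fun level v => if v ≠ 0 then (pvNextDict.get? level).getD "" else level)
        (pvLab (min k 5))
      = pvLab (min (k + vs.countP (fun v => decide (v ≠ 0))) 5) := by
  induction vs generalizing k with
  | nil => simp
  | cons x xs ih =>
    simp only [List.foldl_cons, List.countP_cons]
    by_cases hx : x = 0
    · subst hx
      simpa using ih k
    · simp only [hx, ne_eq, not_false_eq_true, if_true, decide_true]
      rw [pv_next_lab k, ih (k + 1)]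
      ring_nf

-- A's count fold is the countP of truthy values, shifted by the accumulator
theorem pv_count_eq (vs : List Int) (a : Int) :
    vs.foldl (fun acc v => if v ≠ 0 then acc + 1 else acc) a
      = a + ((vs.countP (fun v => decide (v ≠ 0))) : Int) := by
  induction vs generalizing a with
  | nil => simp
  | cons x xs ih =>
    simp only [List.foldl_cons, List.countP_cons, ih]
    by_cases hx : x ≠ 0
    · simp [hx]; ring
    · simp [hx]

-- A's threshold cascade is the label of the saturated count
theorem pv_cascade_eq (n : Nat) :
    (if (n : Int) ≥ 5 then "transcendent"
     else if (n : Int) ≥ 4 then "supreme"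
     else if (n : Int) ≥ 3 then "mega_enhanced"
     else if (n : Int) ≥ 2 then "ultra"
     else if (n : Int) ≥ 1 then "enhanced"
     else "basic") = pvLab (min n 5) := by
  rcases Nat.lt_or_ge n 5 with h | h
  · interval_cases n <;> decide
  · have h5 : (5 : Int) ≤ (n : Int) := by exact_mod_cast h
    have hm : min n 5 = 5 := by omega
    rw [hm]
    simp only [ge_iff_le, h5, if_pos]
    decide

-- ===== VERDICT (by name: the statement is the Claim_ definition above) =====
theorem determine_optimization_level_py_spec : Claim_equal_determine_optimization_level_py := by
  intro metrics _
  unfold Spec_determine_optimization_level_py determine_optimization_level_py determine_optimization_level_py_alt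
  by_cases h : (PySem.Dict.ofList metrics : PySem.Dict String Int).items = []
  · simp [h]
  · simp only [h, if_false]
    rw [pv_count_eq, zero_add, pv_cascade_eq]
    have := pv_fold_lab (PySem.Dict.ofList metrics : PySem.Dict String Int).values 0
    simpa using this.symm
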